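-- pv_equiv track=rewrite | github.com/wuihee/data-structures-and-algorithms | programming-paradigm/dynamic_programming/min_max_path/keyboard.py | min_steps_naive
-- ===== SOURCE A (Python) =====
-- def min_steps_naive(n):
--     """Naive recursive solution."""
--
--     # Base case: you start off with 1 'A' already on the screen, therefore, the
--     # number of operations needed to get to 1 'A' is 0.
--     if n == 1:
--         return 0
--
--     min_ops = float('inf')
--     for i in range(1, n):
--         if n % i == 0:
--             ops = min_steps_naive(i) + n // i
--             min_ops = min(min_ops, ops)
--
--     return min_ops
-- ===== SOURCE B (Python) =====
-- def min_steps_naive(n):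
--     # Sum of prime factors (with multiplicity) by trial division up to sqrt(n).
--     total, m, d = 0, n, 2
--     while d * d <= m:
--         while m % d == 0:
--             total += d
--             m //= d
--         d += 1
--     if m > 1:
--         total += m
--     return total
-- ===== Notes on version B (the rewrite author's own statement) =====
-- stated objective: faster
-- what changed: Replaces the naive recursion that minimises over all divisor chains with a closed-form fact: the minimum number of operations equals the sum of n's prime factors with multiplicity, computed by trial division up to sqrt(n).
-- outside the precondition, e.g. on min_steps_naive(0): A returns inf, B returns 0; on min_steps_naive(-5): A returns inf, B returns 0
import Mathlib
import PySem

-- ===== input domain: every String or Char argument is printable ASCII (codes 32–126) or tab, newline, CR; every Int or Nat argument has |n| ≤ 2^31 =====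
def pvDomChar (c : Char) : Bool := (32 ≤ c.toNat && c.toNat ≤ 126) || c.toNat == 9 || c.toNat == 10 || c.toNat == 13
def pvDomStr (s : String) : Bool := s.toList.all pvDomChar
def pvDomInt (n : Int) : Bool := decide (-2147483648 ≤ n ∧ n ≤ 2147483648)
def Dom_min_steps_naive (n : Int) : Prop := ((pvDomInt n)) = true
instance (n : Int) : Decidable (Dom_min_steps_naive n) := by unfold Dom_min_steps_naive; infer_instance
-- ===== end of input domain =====

-- B returns the same value as A for every n ≥ 1 by a different algorithm: trial division
-- summing n's prime factors with multiplicity, instead of A's naive recursion over divisors.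

-- ===== PORT A =====
-- Python's float('inf') sentinel is rendered as `none`; optMinA acc x mirrors min(min_ops, ops).
def optMinA : Option Int → Option Int → Option Int
  | none, b => b
  | some m, none => some m
  | some m, some x => some (min m x)

-- goA fuel n mirrors min_steps_naive(n) for n ≥ 0 whenever n ≤ fuel (the fuel only makes the
-- recursion structural: every recursive call has i < n, so the fuel-out case is unreachable
-- from min_steps_naive below); range(1, n) = List.range' 1 (n - 1).
def goA : Nat → Nat → Option Int
  | 0, _ => none
  | fuel + 1, n =>
    if n = 1 then some 0
    else
      (List.range' 1 (n - 1)).foldl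
        (fun min_ops i =>
          if n % i = 0 then
            optMinA min_ops ((goA fuel i).map (· + ((n / i : Nat) : Int)))
          else min_ops)
        none

-- For n ≤ 0 Python A returns float('inf'), not an int: those inputs are outside Pre_;
-- there this port returns 0 (n.toNat = 0, empty fold, getD 0).
def min_steps_naive (n : Int) : Int := (goA n.toNat n.toNat).getD 0

-- ===== PORT B =====
-- inner `while m % d == 0: total += d; m //= d`; the fuel and the guards 2 ≤ d, 0 < m only
-- make the loop a structural recursion (m strictly drops each pass, so fuel = m suffices)
def stripB : Nat → Nat → Nat → Nat → Nat × Nat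
  | 0, _, m, total => (m, total)
  | fuel + 1, d, m, total =>
    if 2 ≤ d ∧ 0 < m ∧ m % d = 0 then stripB fuel d (m / d) (total + d)
    else (m, total)

-- outer `while d * d <= m: …; d += 1` (fuel = m + 1 - d drops each pass)
def outerB : Nat → Nat → Nat → Nat → Nat × Nat
  | 0, _, m, total => (m, total)
  | fuel + 1, d, m, total =>
    if d * d ≤ m then
      let p := stripB m d m total
      outerB fuel (d + 1) p.1 p.2
    else (m, total)

-- For n ≤ 0 the Python B returns 0 (both loops and the final branch are skipped),
-- and so does this port via n.toNat = 0: exact on all of Dom.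
def min_steps_naive_alt (n : Int) : Int :=
  let p := outerB (n.toNat + 1) 2 n.toNat 0
  if 1 < p.1 then ((p.2 + p.1 : Nat) : Int) else ((p.2 : Nat) : Int)

-- ===== PRECONDITION & SPEC =====
-- Pre_ excludes n ≤ 0, on which Python A returns float('inf'), which is not an int.
def Pre_min_steps_naive (n : Int) : Prop := 1 ≤ n
instance (n : Int) : Decidable (Pre_min_steps_naive n) := by unfold Pre_min_steps_naive; infer_instance
def pvWitness_min_steps_naive : Int := (6)

def Spec_min_steps_naive (n : Int) (out : Int) : Prop := out = min_steps_naive_alt n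
instance (n : Int) (out : Int) : Decidable (Spec_min_steps_naive n out) := by unfold Spec_min_steps_naive; infer_instance

-- ===== CLAIM (what is proved, stated in full; the proofs are below) =====
def Claim_equal_min_steps_naive : Prop := ∀ (n : Int), Dom_min_steps_naive n → Pre_min_steps_naive n → Spec_min_steps_naive n (min_steps_naive n)

-- ===== LEMMAS AND PROOFS =====

-- sum of prime factors with multiplicity: the common value of both programs for n ≥ 1
def sopf (n : Nat) : Nat := n.primeFactorsList.sum

theorem sopf_mul (a b : Nat) (ha : a ≠ 0) (hb : b ≠ 0) : sopf (a * b) = sopf a + sopf b := by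
  unfold sopf
  rw [(Nat.perm_primeFactorsList_mul ha hb).sum_eq, List.sum_append]

theorem sopf_prime {p : Nat} (hp : p.Prime) : sopf p = p := by
  unfold sopf; rw [Nat.primeFactorsList_prime hp]; simp

theorem sopf_one : sopf 1 = 0 := by simp [sopf]

theorem one_le_prod_of_two_le (l : List Nat) (h : ∀ x ∈ l, 2 ≤ x) : 1 ≤ l.prod := by
  induction l with
  | nil => simp
  | cons a t ih =>
    have ha := h a (by simp)
    have ht := ih (fun x hx => h x (by simp [hx]))
    simp only [List.prod_cons]
    exact Nat.one_le_iff_ne_zero.mpr (Nat.mul_ne_zero (by omega) (by omega))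

theorem sum_le_prod_of_two_le (l : List Nat) (h : ∀ x ∈ l, 2 ≤ x) : l.sum ≤ l.prod := by
  induction l with
  | nil => simp
  | cons a t ih =>
    have ha : 2 ≤ a := h a (by simp)
    have ht : ∀ x ∈ t, 2 ≤ x := fun x hx => h x (by simp [hx])
    have hts := ih ht
    simp only [List.sum_cons, List.prod_cons]
    cases t with
    | nil => simp
    | cons b u =>
      have hb : 2 ≤ b := ht b (by simp)
      have hu : 1 ≤ u.prod := one_le_prod_of_two_le u (fun x hx => ht x (by simp [hx]))
      have hprod : 2 ≤ (b :: u).prod := by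
        simp only [List.prod_cons]
        calc 2 ≤ b * 1 := by omega
          _ ≤ b * u.prod := Nat.mul_le_mul_left b hu
      have key : a + (b :: u).prod ≤ a * (b :: u).prod := by nlinarith
      simp only [List.sum_cons, List.prod_cons] at hts key ⊢
      omega

theorem sopf_le (m : Nat) (h : 1 ≤ m) : sopf m ≤ m := by
  have := sum_le_prod_of_two_le m.primeFactorsList
    (fun x hx => (Nat.prime_of_mem_primeFactorsList hx).two_le)
  rwa [Nat.prod_primeFactorsList (by omega)] at this

-- every prime factor of m exceeding √m forces m prime (m ≥ 2)
theorem prime_of_all_factors_large (m : Nat) (h2 : 2 ≤ m)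
    (h : ∀ p : Nat, p.Prime → p ∣ m → m < p * p) : m.Prime := by
  by_contra hnp
  have hsq := Nat.minFac_sq_le_self (by omega) hnp
  have hp := Nat.minFac_prime (n := m) (by omega)
  have := h m.minFac hp (Nat.minFac_dvd m)
  rw [pow_two] at hsq
  omega

-- ---- B computes sopf ----

theorem stripB_fst_le (fuel d m total : Nat) : (stripB fuel d m total).1 ≤ m := by
  induction fuel generalizing m total with
  | zero => simp [stripB]
  | succ fuel ih =>
    rw [stripB]
    split
    next h => exact le_trans (ih (m / d) (total + d)) (Nat.div_le_self m d)
    next => simp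

theorem stripB_id_of_not_dvd (fuel d m total : Nat) (h : ¬ d ∣ m) :
    stripB fuel d m total = (m, total) := by
  cases fuel with
  | zero => rfl
  | succ fuel =>
    rw [stripB, if_neg]
    rintro ⟨-, -, hmod⟩
    exact h (Nat.dvd_of_mod_eq_zero hmod)

theorem stripB_spec (d : Nat) (hd : d.Prime) :
    ∀ fuel m total, 0 < m → m ≤ fuel →
      ¬ d ∣ (stripB fuel d m total).1 ∧ 0 < (stripB fuel d m total).1 ∧
        (stripB fuel d m total).1 ∣ m ∧
        (stripB fuel d m total).2 + sopf (stripB fuel d m total).1 = total + sopf m := by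
  intro fuel
  induction fuel with
  | zero => intro m total hm hf; omega
  | succ fuel ih =>
    intro m total hm hf
    rw [stripB]
    by_cases h : 2 ≤ d ∧ 0 < m ∧ m % d = 0
    · rw [if_pos h]
      have hdvd : d ∣ m := Nat.dvd_of_mod_eq_zero h.2.2
      have hd2 : 2 ≤ d := h.1
      have hdm : d ≤ m := Nat.le_of_dvd hm hdvd
      have hlt : m / d < m := Nat.div_lt_self hm (by omega)
      have hpos : 0 < m / d := Nat.div_pos hdm (by omega)
      obtain ⟨h1, h2, h3, h4⟩ := ih (m / d) (total + d) hpos (by omega)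
      refine ⟨h1, h2, h3.trans (Nat.div_dvd_of_dvd hdvd), ?_⟩
      have hmul : m = d * (m / d) := (Nat.mul_div_cancel' hdvd).symm
      have : sopf m = d + sopf (m / d) := by
        conv_lhs => rw [hmul]
        rw [sopf_mul d (m / d) (by omega) (by omega), sopf_prime hd]
      omega
    · rw [if_neg h]
      have hd2 := hd.two_le
      refine ⟨?_, hm, dvd_rfl, rfl⟩
      intro hdvd
      exact h ⟨hd2, hm, Nat.mod_eq_zero_of_dvd hdvd⟩

-- terminal state of the outer loop: m has no prime factor below d and d * d > m, so m is 1 or prime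
theorem outerB_stop_val (d m total : Nat) (hm : 0 < m) (hstop : ¬ d * d ≤ m)
    (hinv : ∀ p : Nat, p.Prime → p ∣ m → d ≤ p) :
    (if 1 < m then total + m else total) = total + sopf m := by
  rcases Nat.lt_or_ge 1 m with h1 | h1
  · have hprime : m.Prime := prime_of_all_factors_large m h1 (fun p hp hpm => by
      have hdp := hinv p hp hpm
      have := Nat.mul_le_mul hdp hdp
      omega)
    rw [if_pos h1, sopf_prime hprime]
  · have hm1 : m = 1 := by omega
    rw [if_neg (by omega), hm1, sopf_one]
    omega

theorem outerB_spec : ∀ fuel d m total, m + 1 - d ≤ fuel → 2 ≤ d → 0 < m →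
    (∀ p : Nat, p.Prime → p ∣ m → d ≤ p) →
    (if 1 < (outerB fuel d m total).1 then (outerB fuel d m total).2 + (outerB fuel d m total).1
     else (outerB fuel d m total).2) = total + sopf m := by
  intro fuel
  induction fuel with
  | zero =>
    intro d m total hk hd hm hinv
    have hdd : d ≤ d * d := Nat.le_mul_of_pos_left d (by omega)
    rw [outerB]
    exact outerB_stop_val d m total hm (by omega) hinv
  | succ fuel ihk =>
    intro d m total hk hd hm hinv
    rw [outerB]
    by_cases hc : d * d ≤ m
    · rw [if_pos hc]
      simp only
      have hdd : d ≤ d * d := Nat.le_mul_of_pos_left d (by omega)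
      have hdm : d ≤ m := le_trans hdd hc
      by_cases hdp : d.Prime
      · obtain ⟨h1, h2, h3, h4⟩ := stripB_spec d hdp m m total hm le_rfl
        have hle := stripB_fst_le m d m total
        have hinv' : ∀ p : Nat, p.Prime → p ∣ (stripB m d m total).1 → d + 1 ≤ p := by
          intro p hp hpm
          have hge := hinv p hp (hpm.trans h3)
          rcases Nat.eq_or_lt_of_le hge with he | hl
          · exact absurd (he ▸ hpm) h1
          · omega
        have := ihk (d + 1) (stripB m d m total).1 (stripB m d m total).2
          (by omega) (by omega) h2 hinv'
        rw [this, h4]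
      · have hndvd : ¬ d ∣ m := by
          intro hdvd
          have hq := Nat.minFac_prime (n := d) (by omega)
          have hqd : d.minFac ∣ d := Nat.minFac_dvd d
          have hqm : d.minFac ∣ m := hqd.trans hdvd
          have hge := hinv d.minFac hq hqm
          have : d.minFac = d := le_antisymm (Nat.le_of_dvd (by omega) hqd) hge
          exact hdp (this ▸ hq)
        rw [stripB_id_of_not_dvd m d m total hndvd]
        have hinv' : ∀ p : Nat, p.Prime → p ∣ m → d + 1 ≤ p := by
          intro p hp hpm
          have hge := hinv p hp hpm
          rcases Nat.eq_or_lt_of_le hge with he | hl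
          · exact absurd (he ▸ hp) hdp
          · omega
        exact ihk (d + 1) m total (by omega) (by omega) hm hinv'
    · rw [if_neg hc]
      exact outerB_stop_val d m total hm hc hinv

theorem B_eq_sopf (n : Nat) (h : 1 ≤ n) :
    (if 1 < (outerB (n + 1) 2 n 0).1 then (outerB (n + 1) 2 n 0).2 + (outerB (n + 1) 2 n 0).1
     else (outerB (n + 1) 2 n 0).2) = sopf n := by
  have := outerB_spec (n + 1) 2 n 0 (by omega) le_rfl h (fun p hp _ => hp.two_le)
  simpa using this

-- ---- A computes sopf: generic facts about folding optMinA ----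

-- running the fold from `some w` can only shrink the accumulator
theorem foldl_optMinA_le {α : Type} (c : α → Prop) [DecidablePred c] (f : α → Int) :
    ∀ (l : List α) (w : Int), ∃ w', l.foldl
      (fun acc x => if c x then optMinA acc (some (f x)) else acc) (some w) = some w' ∧ w' ≤ w := by
  intro l
  induction l with
  | nil => exact fun w => ⟨w, rfl, le_rfl⟩
  | cons a t ih =>
    intro w
    by_cases hc : c a
    · simp only [List.foldl_cons, if_pos hc, optMinA]
      obtain ⟨w', hw', hle⟩ := ih (min w (f a))
      exact ⟨w', hw', le_trans hle (min_le_left _ _)⟩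
    · simp only [List.foldl_cons, if_neg hc]
      exact ih w

-- any member passing the test bounds the fold's result from above
theorem foldl_optMinA_mem {α : Type} (c : α → Prop) [DecidablePred c] (f : α → Int) :
    ∀ (l : List α) (acc : Option Int) (j : α), j ∈ l → c j →
      ∃ w, l.foldl (fun acc x => if c x then optMinA acc (some (f x)) else acc) acc = some w ∧
        w ≤ f j := by
  intro l
  induction l with
  | nil => intro _ j hj; cases hj
  | cons a t ih =>
    intro acc j hj hcj
    rcases List.mem_cons.mp hj with rfl | hjt
    · simp only [List.foldl_cons, if_pos hcj]
      cases acc with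
      | none =>
        obtain ⟨w', hw', hle⟩ := foldl_optMinA_le c f t (f j)
        exact ⟨w', by simpa [optMinA] using hw', hle⟩
      | some w0 =>
        obtain ⟨w', hw', hle⟩ := foldl_optMinA_le c f t (min w0 (f j))
        exact ⟨w', by simpa [optMinA] using hw', le_trans hle (min_le_right _ _)⟩
    · simp only [List.foldl_cons]
      exact ih _ j hjt hcj

-- a lower bound on every passing member is a lower bound on the fold's result
theorem foldl_optMinA_lb {α : Type} (c : α → Prop) [DecidablePred c] (f : α → Int) (v : Int) :
    ∀ (l : List α) (acc : Option Int), (∀ x ∈ l, c x → v ≤ f x) →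
      (acc = none ∨ ∃ w, acc = some w ∧ v ≤ w) →
      (l.foldl (fun acc x => if c x then optMinA acc (some (f x)) else acc) acc = none ∨
       ∃ w, l.foldl (fun acc x => if c x then optMinA acc (some (f x)) else acc) acc = some w ∧
         v ≤ w) := by
  intro l
  induction l with
  | nil => intro acc _ hacc; exact hacc
  | cons a t ih =>
    intro acc hub hacc
    have hub' : ∀ x ∈ t, c x → v ≤ f x := fun x hx => hub x (by simp [hx])
    simp only [List.foldl_cons]
    by_cases hc : c a
    · rw [if_pos hc]
      have hva := hub a (by simp) hc
      apply ih _ hub'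
      right
      rcases hacc with rfl | ⟨w, rfl, hw⟩
      · exact ⟨f a, rfl, hva⟩
      · exact ⟨min w (f a), rfl, le_min hw hva⟩
    · rw [if_neg hc]
      exact ih _ hub' hacc

-- the recursion of A returns exactly the sum of prime factors for every 1 ≤ n ≤ fuel
theorem goA_eq_sopf : ∀ fuel n : Nat, 1 ≤ n → n ≤ fuel → goA fuel n = some (sopf n : Int) := by
  intro fuel
  induction fuel with
  | zero => intro n h1 h2; omega
  | succ fuel ih =>
    intro n h1 h2
    rw [goA]
    by_cases hone : n = 1
    · rw [if_pos hone, hone, sopf_one]; rfl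
    · rw [if_neg hone]
      have hn2 : 2 ≤ n := by omega
      -- replace each recursive call by its value (ih applies: every i in range is < n ≤ fuel + 1)
      have hcongr :
          (List.range' 1 (n - 1)).foldl
            (fun min_ops i =>
              if n % i = 0 then
                optMinA min_ops ((goA fuel i).map (· + ((n / i : Nat) : Int)))
              else min_ops) none
          = (List.range' 1 (n - 1)).foldl
            (fun min_ops i =>
              if n % i = 0 then
                optMinA min_ops (some ((sopf i : Int) + ((n / i : Nat) : Int)))
              else min_ops) none := by
        apply PySem.List.foldl_congr_mem
        intro acc x hx
        have hxr := List.mem_range'_1.mp hx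
        rw [ih x (by omega) (by omega)]
        rfl
      rw [hcongr]
      -- the witness divisor j = n / minFac n attains the minimum, which is sopf n
      set p := n.minFac with hp
      have hpp : p.Prime := Nat.minFac_prime (by omega)
      have hpd : p ∣ n := Nat.minFac_dvd n
      have hp2 : 2 ≤ p := hpp.two_le
      have hpn : p ≤ n := Nat.le_of_dvd (by omega) hpd
      set j := n / p with hj
      have hjd : j ∣ n := Nat.div_dvd_of_dvd hpd
      have hj1 : 1 ≤ j := Nat.div_pos hpn (by omega)
      have hjlt : j < n := Nat.div_lt_self (by omega) (by omega)
      have hnj : n / j = p := by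
        rw [hj, Nat.div_div_self hpd (by omega)]
      have hjmem : j ∈ List.range' 1 (n - 1) := List.mem_range'_1.mpr (by omega)
      have hcj : n % j = 0 := Nat.mod_eq_zero_of_dvd hjd
      have hmul : n = j * p := by rw [hj]; exact (Nat.div_mul_cancel hpd).symm
      have hsopf : sopf n = sopf j + p := by
        conv_lhs => rw [hmul]
        rw [sopf_mul j p (by omega) (by omega), sopf_prime hpp]
      have hfj : ((sopf j : Int) + ((n / j : Nat) : Int)) = (sopf n : Int) := by
        rw [hnj, hsopf]; push_cast; ring
      have hub : ∀ x ∈ List.range' 1 (n - 1), n % x = 0 →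
          (sopf n : Int) ≤ (sopf x : Int) + ((n / x : Nat) : Int) := by
        intro x hx hcx
        have hxr := List.mem_range'_1.mp hx
        have hxd : x ∣ n := Nat.dvd_of_mod_eq_zero hcx
        have hq1 : 1 ≤ n / x := Nat.div_pos (Nat.le_of_dvd (by omega) hxd) (by omega)
        have hmul' : n = x * (n / x) := (Nat.mul_div_cancel' hxd).symm
        have hnat : sopf n ≤ sopf x + n / x := by
          conv_lhs => rw [hmul']
          rw [sopf_mul x (n / x) (by omega) (by omega)]
          have := sopf_le (n / x) hq1
          omega
        exact_mod_cast hnat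
      obtain ⟨w, hw, hwle⟩ := foldl_optMinA_mem
        (fun x : Nat => n % x = 0)
        (fun x : Nat => (sopf x : Int) + ((n / x : Nat) : Int))
        (List.range' 1 (n - 1)) none j hjmem hcj
      have hlb := foldl_optMinA_lb
        (fun x : Nat => n % x = 0)
        (fun x : Nat => (sopf x : Int) + ((n / x : Nat) : Int))
        ((sopf n : Int)) (List.range' 1 (n - 1)) none hub (Or.inl rfl)
      -- restate both facts with the fold as it appears in the goal (defeq)
      have hwG : (List.range' 1 (n - 1)).foldl
          (fun min_ops i =>
            if n % i = 0 then
              optMinA min_ops (some ((sopf i : Int) + ((n / i : Nat) : Int)))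
            else min_ops) none = some w := hw
      have hlbG : ((List.range' 1 (n - 1)).foldl
          (fun min_ops i =>
            if n % i = 0 then
              optMinA min_ops (some ((sopf i : Int) + ((n / i : Nat) : Int)))
            else min_ops) none = none ∨
          ∃ w2, (List.range' 1 (n - 1)).foldl
            (fun min_ops i =>
              if n % i = 0 then
                optMinA min_ops (some ((sopf i : Int) + ((n / i : Nat) : Int)))
              else min_ops) none = some w2 ∧ (sopf n : Int) ≤ w2) := hlb
      rw [hwG] at hlbG
      rw [hwG]
      rcases hlbG with hnone | ⟨w2, hw2, hv⟩
      · cases hnone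
      · have hww : w = w2 := Option.some.inj hw2
        have hwub : w ≤ (sopf n : Int) := by
          calc w ≤ (sopf j : Int) + ((n / j : Nat) : Int) := hwle
            _ = (sopf n : Int) := hfj
        have : w = (sopf n : Int) := le_antisymm hwub (hww ▸ hv)
        rw [this]

-- ===== VERDICT (by name: the statement is the Claim_ definition above) =====
theorem min_steps_naive_spec : Claim_equal_min_steps_naive := by
  intro n _ hpre
  unfold Spec_min_steps_naive min_steps_naive min_steps_naive_alt
  have h1 : 1 ≤ n.toNat := by
    unfold Pre_min_steps_naive at hpre; omega
  rw [goA_eq_sopf n.toNat n.toNat h1 le_rfl]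
  have hb := B_eq_sopf n.toNat h1
  show ((sopf n.toNat : Int)) =
    if 1 < (outerB (n.toNat + 1) 2 n.toNat 0).1 then
      (((outerB (n.toNat + 1) 2 n.toNat 0).2 + (outerB (n.toNat + 1) 2 n.toNat 0).1 : Nat) : Int)
    else (((outerB (n.toNat + 1) 2 n.toNat 0).2 : Nat) : Int)
  by_cases hc : 1 < (outerB (n.toNat + 1) 2 n.toNat 0).1
  · rw [if_pos hc] at hb ⊢
    exact_mod_cast hb.symm
  · rw [if_neg hc] at hb ⊢
    exact_mod_cast hb.symm
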